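-- pv_equiv track=rewrite | github.com/Johnpaulbaraquia/Opensource-final-group5.io | Converter.py | bin_hex
-- ===== SOURCE A (Python) =====
-- def bin_hex(num):
--
--     #using the input (Eliminating a few potential errors)
--
--     num=str(num)
--     num.lstrip()
--     num.rstrip()
--
--     #initializing variables set 1
--
--     hexadecimal=''
--     flagbin=False
--     integer=''
--     decimal=''
--
--     #defining the number mapping
--
--     NumMap={'0000':'0','0001':'1','0010':'2','0011':'3','0100':'4','0101':'5','0110':'6','0111':'7',\
--             '1000':'8','1001':'9','1010':'A','1011':'B','1100':'C','1101':'D','1110':'E','1111':'F'}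
--
--     #checking whether the input is a number
--
--     for i in num:
--         if i=='.' and flagbin==False:
--             flagbin=True
--         elif ((i not in ('0','1')) and i!='.') or (i=='.' and flagbin==True):
--             return 'Wrong Input. Please check the input again.'
--
--     #separating the integer and float part
--
--     for i in range(len(num)):
--         if num[i]=='.':
--             decimal=num[i+1:]
--             break
--         integer+=num[i]
--
--     if decimal=='':
--         decimal='0'
--
--     #initializing variables set 2
--
--     end_marker=len(integer)
--     begining_marker=len(integer)
--
--     #slicing out 4 digits and geting the corresponding map
--
--     while end_marker>0:
--         begining_marker-=4
--         if begining_marker<0: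
--             begining_marker=0
--         sliced=num[begining_marker:end_marker]
--         while len(sliced)<4:
--             sliced='0'+sliced
--         hexadecimal=NumMap[sliced]+hexadecimal
--         end_marker=begining_marker
--
--     #stripping the 0's to the left and returning 0 if empty
--
--     hexadecimal=hexadecimal.lstrip('0')
--     if hexadecimal=='':
--         hexadecimal='0'
--
--     #differenciating between float and integer part
--
--     hexadecimal=hexadecimal+'.'
--
--     #initializing variables set 2
--
--     end_marker=0
--     begining_marker=0
--     dec_len=len(decimal)
--
--     #slicing out 4 digits and geting the corresponding map
--
--     while begining_marker<dec_len:
--         end_marker+=4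
--         if begining_marker>dec_len:
--             begining_marker=dec_len
--         sliced=decimal[begining_marker:end_marker]
--         while len(sliced)<4:
--             sliced=sliced+'0'
--         hexadecimal=hexadecimal+NumMap[sliced]
--         begining_marker=end_marker
--
--     #returning the result
--
--     return hexadecimal
-- ===== SOURCE B (Python) =====
-- def bin_hex(num):
--     num = str(num)
--     if num.count('.') > 1 or any(c not in '01.' for c in num):
--         return 'Wrong Input. Please check the input again.'
--     int_str, _dot, frac_str = num.partition('.')
--     frac = frac_str or '0'
--     frac += '0' * ((4 - len(frac) % 4) % 4)
--     int_hex = format(int(int_str, 2) if int_str else 0, 'X')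
--     frac_hex = ''.join(format(int(frac[i:i + 4], 2), 'X') for i in range(0, len(frac), 4))
--     return int_hex + '.' + frac_hex
-- ===== Notes on version B (the rewrite author's own statement) =====
-- stated objective: simpler
-- what changed: B replaces A's flag-driven validation loop, manual split loop, right-to-left 4-bit grouping with dict lookups and leading-zero stripping by a count/membership validity test, a partition at the first dot, and a closed-form numeric conversion (parse the integer bits to a number and format it in uppercase hex), with the fraction chunked left-to-right after one up-front right-padding.
import Mathlib
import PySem

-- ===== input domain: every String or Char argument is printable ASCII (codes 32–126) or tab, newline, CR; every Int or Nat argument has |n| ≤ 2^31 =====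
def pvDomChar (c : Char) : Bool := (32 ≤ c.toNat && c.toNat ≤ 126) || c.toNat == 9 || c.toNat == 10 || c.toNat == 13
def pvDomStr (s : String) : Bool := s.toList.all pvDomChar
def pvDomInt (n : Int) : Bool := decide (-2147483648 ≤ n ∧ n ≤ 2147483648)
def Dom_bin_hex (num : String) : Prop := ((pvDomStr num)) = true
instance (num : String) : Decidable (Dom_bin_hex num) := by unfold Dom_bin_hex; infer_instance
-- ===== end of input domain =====

-- B replaces A's hand-rolled right-to-left 4-bit grouping, dict lookups and zero-stripping by a
-- closed-form numeric conversion (binary → Nat → hex digits); objective: simpler.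

-- ===== PORT A =====
-- A's NumMap dict; strings are modeled as List Char throughout (PYSEM convention).
def numMapA : PySem.Dict (List Char) (List Char) :=
  PySem.Dict.ofList [(['0','0','0','0'],['0']),(['0','0','0','1'],['1']),(['0','0','1','0'],['2']),(['0','0','1','1'],['3']),
   (['0','1','0','0'],['4']),(['0','1','0','1'],['5']),(['0','1','1','0'],['6']),(['0','1','1','1'],['7']),
   (['1','0','0','0'],['8']),(['1','0','0','1'],['9']),(['1','0','1','0'],['A']),(['1','0','1','1'],['B']),
   (['1','1','0','0'],['C']),(['1','1','0','1'],['D']),(['1','1','1','0'],['E']),(['1','1','1','1'],['F'])]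

-- A's validation loop over the characters, carrying flagbin; true = no early error return.
def checkA : List Char → Bool → Bool
  | [], _ => true
  | i :: t, flag =>
    if i = '.' ∧ flag = false then checkA t true
    else if ((i ≠ '0' ∧ i ≠ '1') ∧ i ≠ '.') ∨ (i = '.' ∧ flag = true) then false
    else checkA t flag

-- A's separation loop: accumulate integer until the first '.', decimal = rest after it.
def sepA : List Char → List Char × List Char
  | [] => ([], [])
  | c :: t => if c = '.' then ([], t) else ((sepA t).1.cons c |>.reverse.reverse, (sepA t).2)

-- inner while: left-pad sliced with '0' until length 4
def padL4 (s : List Char) : List Char :=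
  if s.length < 4 then padL4 ('0' :: s) else s
  termination_by 4 - s.length
  decreasing_by simp_all; omega

-- inner while of the fractional loop: right-pad sliced with '0' until length 4
def padR4 (s : List Char) : List Char :=
  if s.length < 4 then padR4 (s ++ ['0']) else s
  termination_by 4 - s.length
  decreasing_by simp_all; omega

-- A's integer while loop: end_marker = current length, begining_marker = end_marker-4 clamped at 0
-- (Nat subtraction clamps exactly as A's 'if begining_marker<0: begining_marker=0').
-- A slices num[b:e]; since e ≤ len(integer) and integer is a prefix of num this is s.drop b here.
def intLoopA (s : List Char) : List Char :=
  if h : s.length = 0 then []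
  else intLoopA (s.take (s.length - 4))
    ++ numMapA.getD (padL4 (s.drop (s.length - 4))) []
  termination_by s.length
  decreasing_by simp only [List.length_take]; omega

-- A's fractional while loop: chunks of 4 from the left, last chunk right-padded.
def fracLoopA (s : List Char) : List Char :=
  if s.length = 0 then []
  else numMapA.getD (padR4 (s.take 4)) [] ++ fracLoopA (s.drop 4)
  termination_by s.length
  decreasing_by simp only [List.length_drop]; omega

def bin_hex (num : String) : String :=
  -- num=str(num) is the identity on a string; num.lstrip()/rstrip() results are discarded (no-ops)
  let cs := num.toList
  if checkA cs false = false then "Wrong Input. Please check the input again."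
  else
    let p := sepA cs
    let integer := p.1
    let decimal := if p.2 = [] then ['0'] else p.2
    let hex0 := (intLoopA integer).dropWhile (· = '0')   -- hexadecimal.lstrip('0')
    let hex1 := if hex0 = [] then ['0'] else hex0
    String.ofList (hex1 ++ '.' :: fracLoopA decimal)

-- ===== PORT B =====
-- int(s, 2): fold the bits into a Nat
def bitsVal (s : List Char) : Nat :=
  s.foldl (fun a c => 2 * a + (if c = '1' then 1 else 0)) 0

-- format(n, 'X') on Nat, hand-ported (exact for naturals): recursion on n / 16
def hexCharB (n : Nat) : Char :=
  match n with
  | 0 => '0' | 1 => '1' | 2 => '2' | 3 => '3' | 4 => '4' | 5 => '5' | 6 => '6' | 7 => '7'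
  | 8 => '8' | 9 => '9' | 10 => 'A' | 11 => 'B' | 12 => 'C' | 13 => 'D' | 14 => 'E' | _ => 'F'

def toHexB (n : Nat) : List Char :=
  if h : n < 16 then [hexCharB n]
  else toHexB (n / 16) ++ [hexCharB (n % 16)]
  termination_by n
  decreasing_by exact Nat.div_lt_self (by omega) (by omega)

-- the join-comprehension over 4-char chunks; each chunk's value is < 16, one hex digit
def chunksB (s : List Char) : List Char :=
  if s = [] then []
  else hexCharB (bitsVal (s.take 4)) :: chunksB (s.drop 4)
  termination_by s.length
  decreasing_by simp_all [List.length_drop]; cases s <;> simp_all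

def bin_hex_alt (num : String) : String :=
  let cs := num.toList
  if 1 < cs.count '.' ∨ ¬ cs.all (fun c => c = '0' ∨ c = '1' ∨ c = '.') then
    "Wrong Input. Please check the input again."
  else
    let intS := cs.takeWhile (· ≠ '.')                         -- num.partition('.')[0]
    let fracS0 := (cs.dropWhile (· ≠ '.')).drop 1              -- num.partition('.')[2]
    let frac := if fracS0 = [] then ['0'] else fracS0          -- frac_str or '0'
    let padded := frac ++ List.replicate ((4 - frac.length % 4) % 4) '0'
    String.ofList (toHexB (bitsVal intS) ++ '.' :: chunksB padded)

-- ===== PRECONDITION & SPEC =====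
def Spec_bin_hex (num : String) (out : String) : Prop := out = bin_hex_alt num
instance (num : String) (out : String) : Decidable (Spec_bin_hex num out) := by unfold Spec_bin_hex; infer_instance

-- ===== CLAIM (what is proved, stated in full; the proofs are below) =====
def Claim_equal_bin_hex : Prop := ∀ (num : String), Dom_bin_hex num → Spec_bin_hex num (bin_hex num)

-- ===== LEMMAS AND PROOFS =====

-- shorthand predicates used only in proofs
def isBit (c : Char) : Prop := c = '0' ∨ c = '1'

-- validation: A's flag loop computes "all chars legal and at most one '.' (none if flag)"
theorem check_eq (s : List Char) (flag : Bool) :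
    checkA s flag = ((s.all fun c => decide (c = '0' ∨ c = '1' ∨ c = '.')) &&
      decide (s.count '.' ≤ (if flag then 0 else 1))) := by
  induction s generalizing flag with
  | nil => simp [checkA]
  | cons c t ih =>
    rw [checkA]
    by_cases hd : c = '.'
    · subst hd
      cases flag with
      | false =>
        rw [if_pos ⟨rfl, rfl⟩, ih]
        simp
      | true =>
        rw [if_neg (fun hcon => by simpa using hcon.2), if_pos (Or.inr ⟨rfl, rfl⟩)]
        simp
    · by_cases hb : c = '0' ∨ c = '1'
      · rw [if_neg (fun hcon => hd hcon.1),
          if_neg (by rcases hb with rfl | rfl <;> simp), ih]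
        rcases hb with rfl | rfl <;> simp
      · rw [if_neg (fun hcon => hd hcon.1), if_pos]
        · rw [not_or] at hb
          simp only [List.all_cons]
          simp
          intro hcon _
          rcases hcon with h | h | h
          · exact absurd h hb.1
          · exact absurd h hb.2
          · exact absurd h hd
        · rw [not_or] at hb
          exact Or.inl ⟨⟨hb.1, hb.2⟩, hd⟩

-- separation loop = takeWhile/dropWhile split at the first '.'
theorem sep_eq (s : List Char) :
    sepA s = (s.takeWhile (· ≠ '.'), (s.dropWhile (· ≠ '.')).drop 1) := by
  induction s with
  | nil => simp [sepA]
  | cons c t ih =>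
    by_cases hd : c = '.'
    · subst hd; simp [sepA]
    · simp [sepA, ih, hd]

-- the dict lookup of a 4-bit key is the hex digit of its value
theorem key16 (g : List Char) (hl : g.length = 4) (hb : ∀ c ∈ g, isBit c) :
    numMapA.getD g [] = [hexCharB (bitsVal g)] := by
  match g, hl with
  | [a, b, c, d], _ =>
    have ha := hb a (by simp); have hb' := hb b (by simp)
    have hc := hb c (by simp); have hd := hb d (by simp)
    rcases ha with rfl | rfl <;> rcases hb' with rfl | rfl <;>
      rcases hc with rfl | rfl <;> rcases hd with rfl | rfl <;> rfl

theorem padL4_eq (s : List Char) (h : s.length ≤ 4) :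
    padL4 s = List.replicate (4 - s.length) '0' ++ s := by
  fun_induction padL4 s with
  | case1 s hlt ih =>
    rw [ih (by simp; omega)]
    have : 4 - s.length = (4 - ('0' :: s).length) + 1 := by simp; omega
    rw [this, List.replicate_succ']
    simp
  | case2 s hlt =>
    have : s.length = 4 := by omega
    simp [this]

theorem padR4_eq (s : List Char) (h : s.length ≤ 4) :
    padR4 s = s ++ List.replicate (4 - s.length) '0' := by
  fun_induction padR4 s with
  | case1 s hlt ih =>
    rw [ih (by simp; omega)]
    have : 4 - s.length = (4 - (s ++ ['0']).length) + 1 := by simp; omega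
    rw [this, List.replicate_succ]
    simp
  | case2 s hlt =>
    have : s.length = 4 := by omega
    simp [this]

theorem bitsVal_go (s : List Char) (a : Nat) :
    s.foldl (fun a c => 2 * a + (if c = '1' then 1 else 0)) a
      = a * 2 ^ s.length + bitsVal s := by
  induction s generalizing a with
  | nil => simp [bitsVal]
  | cons c t ih =>
    simp only [List.foldl_cons, List.length_cons, bitsVal]
    rw [ih, ih (2 * 0 + _)]
    ring

theorem bitsVal_append (s t : List Char) :
    bitsVal (s ++ t) = bitsVal s * 2 ^ t.length + bitsVal t := by
  unfold bitsVal
  rw [List.foldl_append, bitsVal_go]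
  rfl

theorem bitsVal_lt (s : List Char) : bitsVal s < 2 ^ s.length := by
  induction s with
  | nil => simp [bitsVal]
  | cons c t ih =>
    show List.foldl _ _ _ < _
    rw [List.foldl_cons, bitsVal_go]
    have h1 : (2 * 0 + if c = '1' then 1 else 0) ≤ 1 := by split <;> omega
    simp only [List.length_cons, pow_succ]
    nlinarith [ih]

theorem bitsVal_replicate (k : Nat) : bitsVal (List.replicate k '0') = 0 := by
  induction k with
  | zero => rfl
  | succ n ih =>
    rw [List.replicate_succ']
    rw [bitsVal_append, ih]
    simp [bitsVal]

theorem bitsVal_pad_left (k : Nat) (s : List Char) :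
    bitsVal (List.replicate k '0' ++ s) = bitsVal s := by
  rw [bitsVal_append, bitsVal_replicate]; simp

theorem toHexB_ne_nil (n : Nat) : toHexB n ≠ [] := by
  rw [toHexB]; split <;> simp

theorem toHexB_nil_eval : toHexB 0 = ['0'] := by
  rw [toHexB]; simp [hexCharB]

theorem fracLoopA_nil : fracLoopA [] = [] := by
  rw [fracLoopA]; simp

theorem chunksB_nil : chunksB [] = [] := by
  rw [chunksB]; simp

theorem intLoopA_nil : intLoopA [] = [] := by
  rw [intLoopA]; simp

theorem toHexB_step (n v : Nat) (hv : v < 16) :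
    toHexB (16 * n + v) = if n = 0 then [hexCharB v] else toHexB n ++ [hexCharB v] := by
  rw [toHexB]
  by_cases h0 : n = 0
  · subst h0; simp [hv]
  · rw [dif_neg (by omega)]
    have h1 : (16 * n + v) / 16 = n := by omega
    have h2 : (16 * n + v) % 16 = v := by omega
    rw [h1, h2, if_neg h0]

theorem hexCharB_ne_zero (n : Nat) (h0 : 0 < n) (h16 : n < 16) : hexCharB n ≠ '0' := by
  interval_cases n <;> decide

theorem toHexB_dropWhile (n : Nat) (h : 0 < n) :
    (toHexB n).dropWhile (· = '0') = toHexB n := by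
  induction n using Nat.strong_induction_on with
  | _ n ih =>
    rw [toHexB]
    by_cases h16 : n < 16
    · rw [dif_pos h16]
      simp [List.dropWhile, hexCharB_ne_zero n h h16]
    · rw [dif_neg h16]
      rw [List.dropWhile_append]
      have hq : 0 < n / 16 := Nat.div_pos (by omega) (by omega)
      rw [ih (n / 16) (Nat.div_lt_self (by omega) (by omega)) hq]
      simp [List.isEmpty_iff, toHexB_ne_nil]

-- digit of a left-padded group
theorem padL4_digit (g : List Char) (h : g.length ≤ 4) (hb : ∀ c ∈ g, isBit c) :
    numMapA.getD (padL4 g) [] = [hexCharB (bitsVal g)] := by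
  rw [padL4_eq g h]
  rw [key16 _ (by simp; omega)]
  · rw [bitsVal_pad_left]
  · intro c hc
    rcases List.mem_append.mp hc with hc | hc
    · exact Or.inl (List.eq_of_mem_replicate hc)
    · exact hb c hc

-- A's integer loop agrees with the numeric conversion up to leading zeros
theorem int_drop (s : List Char) (hb : ∀ c ∈ s, isBit c) :
    (intLoopA s).dropWhile (· = '0') = (toHexB (bitsVal s)).dropWhile (· = '0') := by
  induction s using intLoopA.induct with
  | case1 s h =>
    have : s = [] := List.length_eq_zero_iff.mp h
    subst this
    rw [intLoopA_nil]
    simp [bitsVal, toHexB_nil_eval, List.dropWhile]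
  | case2 s h ih =>
    rw [intLoopA, dif_neg h]
    by_cases h4 : s.length ≤ 4
    · have hb0 : s.length - 4 = 0 := by omega
      rw [hb0]
      simp only [List.take_zero, List.drop_zero, intLoopA_nil, List.nil_append]
      rw [padL4_digit s h4 hb]
      have hlt : bitsVal s < 16 := by
        calc bitsVal s < 2 ^ s.length := bitsVal_lt s
        _ ≤ 2 ^ 4 := Nat.pow_le_pow_right (by omega) h4
      rw [toHexB, dif_pos hlt]
    · have hlen4 : (s.drop (s.length - 4)).length = 4 := by
        rw [List.length_drop]; omega
      have hsplit : s.take (s.length - 4) ++ s.drop (s.length - 4) = s :=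
        List.take_append_drop _ s
      have hbt : ∀ c ∈ s.take (s.length - 4), isBit c :=
        fun c hc => hb c (List.mem_of_mem_take hc)
      have hbg : ∀ c ∈ s.drop (s.length - 4), isBit c :=
        fun c hc => hb c (List.mem_of_mem_drop hc)
      have hval : bitsVal s
          = 16 * bitsVal (s.take (s.length - 4)) + bitsVal (s.drop (s.length - 4)) := by
        conv_lhs => rw [← hsplit]
        rw [bitsVal_append, hlen4]
        ring
      have hg16 : bitsVal (s.drop (s.length - 4)) < 16 := by
        have := bitsVal_lt (s.drop (s.length - 4))
        rwa [hlen4] at this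
      rw [padL4_digit _ (by omega) hbg]
      rw [List.dropWhile_append, ih hbt]
      rw [hval, toHexB_step _ _ hg16]
      by_cases ht0 : bitsVal (s.take (s.length - 4)) = 0
      · rw [ht0, if_pos rfl, toHexB_nil_eval]
        simp [List.dropWhile]
      · rw [if_neg ht0]
        rw [toHexB_dropWhile _ (by omega)]
        rw [List.dropWhile_append, toHexB_dropWhile _ (by omega)]

-- ... and exactly, after A's strip-and-default step
theorem int_result (s : List Char) (hb : ∀ c ∈ s, isBit c) :
    (if (intLoopA s).dropWhile (· = '0') = [] then ['0']
     else (intLoopA s).dropWhile (· = '0')) = toHexB (bitsVal s) := by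
  rw [int_drop s hb]
  by_cases h0 : bitsVal s = 0
  · rw [h0, toHexB_nil_eval]
    simp [List.dropWhile]
  · rw [toHexB_dropWhile _ (by omega)]
    simp [toHexB_ne_nil]

-- A's fractional loop = B's chunking of the right-padded string
theorem frac_eq (s : List Char) (hb : ∀ c ∈ s, isBit c) :
    fracLoopA s = chunksB (s ++ List.replicate ((4 - s.length % 4) % 4) '0') := by
  induction s using fracLoopA.induct with
  | case1 s h =>
    have : s = [] := List.length_eq_zero_iff.mp h
    subst this
    rw [fracLoopA_nil]
    have : (4 - ([] : List Char).length % 4) % 4 = 0 := by simp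
    rw [this]
    simp [chunksB_nil]
  | case2 s h ih =>
    rw [fracLoopA, if_neg h]
    by_cases h4 : 4 ≤ s.length
    · have hmod : (4 - (s.drop 4).length % 4) % 4 = (4 - s.length % 4) % 4 := by
        rw [List.length_drop]
        omega
      have htake : (s ++ List.replicate ((4 - s.length % 4) % 4) '0').take 4 = s.take 4 :=
        List.take_append_of_le_length h4
      have hdrop : (s ++ List.replicate ((4 - s.length % 4) % 4) '0').drop 4
          = s.drop 4 ++ List.replicate ((4 - (s.drop 4).length % 4) % 4) '0' := by
        rw [List.drop_append_of_le_length h4, hmod]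
      have hlen4 : (s.take 4).length = 4 := by simp; omega
      rw [chunksB, if_neg (by
        intro hcon
        have hl := congrArg List.length hcon
        simp at hl
        exact h (by simp [hl.1])), htake, hdrop]
      have hpad : padR4 (s.take 4) = s.take 4 := by
        rw [padR4]; simp [hlen4]
      rw [hpad, key16 _ hlen4 (fun c hc => hb c (List.mem_of_mem_take hc))]
      rw [ih (fun c hc => hb c (List.mem_of_mem_drop hc))]
      simp
    · -- 1 ≤ len ≤ 3: a single right-padded chunk on both sides
      have hmod : (4 - s.length % 4) % 4 = 4 - s.length := by omega
      rw [hmod]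
      have htake : s.take 4 = s := List.take_of_length_le (by omega)
      have hdropnil : s.drop 4 = [] := List.drop_eq_nil_of_le (by omega)
      rw [htake, hdropnil, fracLoopA_nil, List.append_nil]
      have hplen : (s ++ List.replicate (4 - s.length) '0').length = 4 := by
        simp; omega
      have hpbits : ∀ c ∈ s ++ List.replicate (4 - s.length) '0', isBit c := by
        intro c hc
        rcases List.mem_append.mp hc with hc | hc
        · exact hb c hc
        · exact Or.inl (List.eq_of_mem_replicate hc)
      rw [padR4_eq s (by omega), key16 _ hplen hpbits]
      rw [chunksB, if_neg (by intro hcon; rw [hcon] at hplen; simp at hplen)]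
      rw [List.take_of_length_le (by rw [hplen]), List.drop_eq_nil_of_le (by rw [hplen]),
        chunksB_nil]

-- the first element surviving dropWhile (· ≠ '.') is a '.'
theorem dropWhile_head_dot (l : List Char) (hd : Char) (tl : List Char)
    (h : l.dropWhile (· ≠ '.') = hd :: tl) : hd = '.' := by
  induction l with
  | nil => simp at h
  | cons a as ih =>
    rw [List.dropWhile_cons] at h
    by_cases ha : a = '.'
    · subst ha
      rw [if_neg (by simp)] at h
      injection h with h1 _
      exact h1.symm
    · rw [if_pos (by simp [ha])] at h
      exact ih h

-- after a valid parse, the decimal part contains no second '.'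
theorem no_dot_in_frac (cs : List Char) (hcount : cs.count '.' ≤ 1) :
    '.' ∉ (cs.dropWhile (· ≠ '.')).drop 1 := by
  have hsplit := List.takeWhile_append_dropWhile (p := fun c => decide (c ≠ '.')) (l := cs)
  have hcd : (cs.dropWhile (· ≠ '.')).count '.' ≤ 1 := by
    have : cs.count '.' = (cs.takeWhile (· ≠ '.')).count '.'
        + (cs.dropWhile (· ≠ '.')).count '.' := by
      conv_lhs => rw [← hsplit]
      exact List.count_append ..
    omega
  cases hdw : cs.dropWhile (· ≠ '.') with
  | nil => simp
  | cons hd tl =>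
    have hhd : hd = '.' := dropWhile_head_dot cs hd tl hdw
    subst hhd
    rw [hdw] at hcd
    rw [List.count_cons_self] at hcd
    simp only [List.drop_one, List.tail_cons]
    exact List.count_eq_zero.mp (by omega)

-- ===== VERDICT (by name: the statement is the Claim_ definition above) =====
theorem bin_hex_spec : Claim_equal_bin_hex := by
  intro num _
  unfold Spec_bin_hex bin_hex bin_hex_alt
  simp only [sep_eq]
  by_cases hok : (num.toList.all fun c => decide (c = '0' ∨ c = '1' ∨ c = '.')) = true
      ∧ num.toList.count '.' ≤ 1
  · rw [if_neg (show ¬(1 < num.toList.count '.' ∨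
        ¬(num.toList.all fun c => decide (c = '0' ∨ c = '1' ∨ c = '.')) = true) by
      rw [not_or]
      exact ⟨by have := hok.2; omega, not_not_intro hok.1⟩)]
    rw [if_neg (show ¬(checkA num.toList false = false) by
      rw [check_eq]
      simp [hok.2]
      intro x hx h0 h1
      have hx' := List.all_eq_true.mp hok.1 x hx
      simp at hx'
      tauto)]
    obtain ⟨hall, hcount⟩ := hok
    have hallm : ∀ c ∈ num.toList, c = '0' ∨ c = '1' ∨ c = '.' := by
      intro c hc
      simpa using List.all_eq_true.mp hall c hc
    have hbint : ∀ c ∈ num.toList.takeWhile (· ≠ '.'), isBit c := by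
      intro c hc
      have hne : c ≠ '.' := by simpa using List.mem_takeWhile_imp hc
      rcases hallm c (List.Sublist.subset (List.takeWhile_sublist _) hc) with h | h | h
      · exact Or.inl h
      · exact Or.inr h
      · exact absurd h hne
    have hbfrac : ∀ c ∈ (if (num.toList.dropWhile (· ≠ '.')).drop 1 = [] then ['0']
        else (num.toList.dropWhile (· ≠ '.')).drop 1), isBit c := by
      split
      · intro c hc; simp at hc; exact Or.inl hc
      · intro c hc
        have hmem : c ∈ num.toList :=
          List.Sublist.subset (List.dropWhile_sublist _) (List.mem_of_mem_drop hc)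
        have hne : c ≠ '.' := by
          rintro rfl
          exact no_dot_in_frac num.toList hcount hc
        rcases hallm c hmem with h | h | h
        · exact Or.inl h
        · exact Or.inr h
        · exact absurd h hne
    rw [int_result _ hbint, frac_eq _ hbfrac]
  · rw [if_pos (show (1 < num.toList.count '.' ∨
        ¬(num.toList.all fun c => decide (c = '0' ∨ c = '1' ∨ c = '.')) = true) by
      by_cases hall : (num.toList.all fun c => decide (c = '0' ∨ c = '1' ∨ c = '.')) = true
      · have : ¬ num.toList.count '.' ≤ 1 := fun hc => hok ⟨hall, hc⟩
        exact Or.inl (by omega)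
      · exact Or.inr hall)]
    rw [if_pos (show checkA num.toList false = false by
      rw [check_eq]
      by_cases hall : (num.toList.all fun c => decide (c = '0' ∨ c = '1' ∨ c = '.')) = true
      · have : ¬ num.toList.count '.' ≤ 1 := fun hc => hok ⟨hall, hc⟩
        simp
        omega
      · cases hb : (num.toList.all fun c => decide (c = '0' ∨ c = '1' ∨ c = '.')) with
        | true => exact absurd hb hall
        | false => simp)]
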